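-- pv_equiv track=rewrite | github.com/tomer196/PAS-score | extra/count_rings.py | canonical_bracelet
-- ===== SOURCE A (Python) =====
-- def canonical_bracelet(chars):
--     s = list(chars)
--     n = len(s)
--
--     def min_rotation(seq):
--         # lexicographically smallest rotation (O(n^2), fine for small rings)
--         return min(seq[i:] + seq[:i] for i in range(n))
--
--     a = min_rotation(s)
--     b = min_rotation(list(reversed(s)))
--     canon = min(a, b)
--     return "".join(canon)
-- ===== SOURCE B (Python) =====
-- def _least_rotation(s):
--     # candidate-pruning least rotation: keep the starts whose rotation prefix
--     # is minimal, extending the prefix one column at a time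
--     n = len(s)
--     t = s + s
--     cand = list(range(n))
--     k = 0
--     while len(cand) > 1 and k < n:
--         m = min(t[i + k] for i in cand)
--         cand = [i for i in cand if t[i + k] == m]
--         k += 1
--     i = cand[0]
--     return t[i:i + n]
--
--
-- def canonical_bracelet(chars):
--     if len(chars) == 0:
--         return chars
--     a = _least_rotation(chars)
--     b = _least_rotation(chars[::-1])
--     return a if a <= b else b
-- ===== Notes on version B (the rewrite author's own statement) =====
-- stated objective: faster
-- what changed: Replaces the build-every-rotation-and-min scan (each of the n candidates materialised as an O(n) slice) by column-wise candidate pruning on the doubled string: keep only the start indices whose rotation prefix is minimal, extending the prefix one character per round, so slices are never built and the candidate set typically collapses after a few rounds (worst case, a one-character-periodic string, both are quadratic).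
import Mathlib
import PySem

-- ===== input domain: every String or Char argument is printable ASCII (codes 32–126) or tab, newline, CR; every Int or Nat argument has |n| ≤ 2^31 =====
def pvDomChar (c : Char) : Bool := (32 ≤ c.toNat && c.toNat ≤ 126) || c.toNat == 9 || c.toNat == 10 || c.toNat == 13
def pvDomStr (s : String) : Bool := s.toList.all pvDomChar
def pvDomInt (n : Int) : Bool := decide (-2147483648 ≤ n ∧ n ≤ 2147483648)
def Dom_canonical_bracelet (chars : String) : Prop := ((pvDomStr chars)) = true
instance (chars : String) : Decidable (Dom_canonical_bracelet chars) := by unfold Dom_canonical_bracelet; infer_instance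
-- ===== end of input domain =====

-- B replaces A's build-every-rotation-and-min scan by column-wise candidate pruning
-- on the doubled string (measured much faster on the generated inputs).

-- ===== PORT A =====
-- min(seq[i:] + seq[:i] for i in range(n)); `none` = the generator was empty (Python: ValueError)
def pvMinRotationA (n : Nat) (seq : List Char) : Option (List Char) :=
  PySem.List.min?
    ((PySem.List.pyRange 0 (n : Int) 1).map
      (fun i => PySem.List.slice seq (some i) none ++ PySem.List.slice seq none (some i)))
    (fun x => x)

def canonical_bracelet (chars : String) : String :=
  let s := chars.toList
  let n := s.length
  match pvMinRotationA n s, pvMinRotationA n s.reverse with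
  | some a, some b => String.ofList (min a b)     -- canon = min(a, b); "".join(canon)
  | _, _ => ""                                    -- Python raises ValueError here (empty input, outside Pre_)

-- ===== PORT B =====
-- while len(cand) > 1 and k < n: m = min(t[i+k] for i in cand); cand = [i for i in cand if t[i+k] == m]; k += 1
-- (t[i+k] is always in range here: i < n and k < n, so i+k < len(t); hence List.getD is exact)
def pvPruneLoop (t : List Char) (n : Nat) (cand : List Nat) (k : Nat) : List Nat :=
  if h : 1 < cand.length ∧ k < n then
    let m := (PySem.List.min? (cand.map (fun i => t.getD (i + k) ' ')) (fun c => c)).getD ' '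
    pvPruneLoop t n (cand.filter (fun i => t.getD (i + k) ' ' == m)) (k + 1)
  else cand
termination_by n - k
decreasing_by omega

def pvLeastRotation (s : List Char) : List Char :=
  let n := s.length
  let t := s ++ s
  let cand := pvPruneLoop t n (List.range n) 0
  let i := cand.headD 0
  (t.drop i).take n        -- t[i:i+n]; 0 ≤ i ≤ n, so this is exactly the Python slice

def canonical_bracelet_alt (chars : String) : String :=
  let s := chars.toList
  if s.length = 0 then chars
  else
    let a := pvLeastRotation s
    let b := pvLeastRotation s.reverse      -- chars[::-1]
    String.ofList (if a ≤ b then a else b)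

-- ===== PRECONDITION & SPEC =====
-- Pre_ excludes only the empty string, on which A raises ValueError (min() of an empty generator).
def Pre_canonical_bracelet (chars : String) : Prop := chars ≠ ""
instance (chars : String) : Decidable (Pre_canonical_bracelet chars) := by unfold Pre_canonical_bracelet; infer_instance
def pvWitness_canonical_bracelet : String := "ba"

def Spec_canonical_bracelet (chars : String) (out : String) : Prop := out = canonical_bracelet_alt chars
instance (chars : String) (out : String) : Decidable (Spec_canonical_bracelet chars out) := by unfold Spec_canonical_bracelet; infer_instance

-- ===== CLAIM (what is proved, stated in full; the proofs are below) =====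
def Claim_equal_canonical_bracelet : Prop := ∀ (chars : String), Dom_canonical_bracelet chars → Pre_canonical_bracelet chars → Spec_canonical_bracelet chars (canonical_bracelet chars)

-- ===== LEMMAS AND PROOFS =====

-- ---- the lexicographic order on List Char (Mathlib's LinearOrder via List.Lex) ----

theorem pvConsLt (a b : Char) (x y : List Char) :
    (a :: x) < (b :: y) ↔ a < b ∨ (a = b ∧ x < y) := by
  constructor
  · intro h
    have h' : List.Lex (· < ·) (a :: x) (b :: y) := h
    cases h' with
    | cons h2 => exact Or.inr ⟨rfl, h2⟩
    | rel h2 => exact Or.inl h2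
  · intro h
    show List.Lex (· < ·) (a :: x) (b :: y)
    rcases h with h | ⟨rfl, h⟩
    · exact List.Lex.rel h
    · exact List.Lex.cons h

theorem pvNotLtNil (x : List Char) : ¬ x < [] := by
  intro h
  have h' : List.Lex (· < ·) x [] := h
  cases h'

theorem pvNilLe (x : List Char) : [] ≤ x := le_of_not_gt (pvNotLtNil x)

theorem pvNilLtCons (a : Char) (x : List Char) : ([] : List Char) < a :: x := by
  show List.Lex (· < ·) [] (a :: x)
  exact List.Lex.nil

theorem pvConsLe (a b : Char) (x y : List Char) :
    (a :: x) ≤ (b :: y) ↔ a < b ∨ (a = b ∧ x ≤ y) := by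
  rw [le_iff_lt_or_eq, pvConsLt, List.cons_eq_cons]
  constructor
  · rintro ((h | ⟨rfl, h⟩) | ⟨rfl, rfl⟩)
    · exact Or.inl h
    · exact Or.inr ⟨rfl, le_of_lt h⟩
    · exact Or.inr ⟨rfl, le_refl _⟩
  · rintro (h | ⟨rfl, h⟩)
    · exact Or.inl (Or.inl h)
    · rcases lt_or_eq_of_le h with h' | rfl
      · exact Or.inl (Or.inr ⟨rfl, h'⟩)
      · exact Or.inr ⟨rfl, rfl⟩

theorem pvTakeMono (k : Nat) (x y : List Char) (h : x ≤ y) : x.take k ≤ y.take k := by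
  induction x generalizing y k with
  | nil => simpa using pvNilLe _
  | cons a x' ih =>
    cases y with
    | nil => exact absurd (lt_of_lt_of_le (pvNilLtCons a x') h) (lt_irrefl _)
    | cons b y' =>
      cases k with
      | zero => simp
      | succ k =>
        rcases (pvConsLe a b x' y').mp h with hab | ⟨rfl, hxy⟩
        · simp only [List.take_succ_cons]
          exact (pvConsLe _ _ _ _).mpr (Or.inl hab)
        · simp only [List.take_succ_cons]
          exact (pvConsLe _ _ _ _).mpr (Or.inr ⟨rfl, ih k y' hxy⟩)

theorem pvLtAppend (x y u v : List Char) (hlen : x.length = y.length) (h : x < y) :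
    x ++ u < y ++ v := by
  induction x generalizing y with
  | nil =>
    cases y with
    | nil => exact absurd h (lt_irrefl _)
    | cons b y' => simp at hlen
  | cons a x' ih =>
    cases y with
    | nil => simp at hlen
    | cons b y' =>
      rcases (pvConsLt a b x' y').mp h with hab | ⟨rfl, hxy⟩
      · exact (pvConsLt _ _ _ _).mpr (Or.inl hab)
      · exact (pvConsLt _ _ _ _).mpr (Or.inr ⟨rfl, ih y' (by simpa using hlen) hxy⟩)

theorem pvAppendSingletonLe (p : List Char) (a b : Char) :
    p ++ [a] ≤ p ++ [b] ↔ a ≤ b := by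
  induction p with
  | nil =>
    simp only [List.nil_append]
    rw [pvConsLe]
    constructor
    · rintro (h | ⟨rfl, _⟩)
      · exact le_of_lt h
      · exact le_refl _
    · intro h
      rcases lt_or_eq_of_le h with h' | rfl
      · exact Or.inl h'
      · exact Or.inr ⟨rfl, le_refl _⟩
  | cons c p' ih =>
    simp only [List.cons_append]
    rw [pvConsLe]
    constructor
    · rintro (h | ⟨-, h⟩)
      · exact absurd h (lt_irrefl c)
      · exact ih.mp h
    · intro h
      exact Or.inr ⟨rfl, ih.mpr h⟩

-- ---- prefixes of rotations of the doubled string ----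

-- prefix of length k of the rotation starting at i of the doubled string
def pvP (t : List Char) (k i : Nat) : List Char := (t.drop i).take k

-- loop invariant: cand is exactly the set of starts whose length-k rotation prefix is minimal
def pvInv (l : List Char) (cand : List Nat) (k : Nat) : Prop :=
  k ≤ l.length ∧ cand ≠ [] ∧ (∀ i ∈ cand, i < l.length) ∧
  (∀ i ∈ cand, ∀ j < l.length, pvP (l ++ l) k i ≤ pvP (l ++ l) k j) ∧
  (∀ j < l.length, ∀ i ∈ cand, pvP (l ++ l) k j ≤ pvP (l ++ l) k i → j ∈ cand)

theorem pvP_length (t : List Char) (k i : Nat) (h : i + k <= t.length) :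
    (pvP t k i).length = k := by
  simp [pvP]; omega

theorem pvP_succ (t : List Char) (k i : Nat) (h : i + k < t.length) :
    pvP t (k + 1) i = pvP t k i ++ [t.getD (i + k) ' '] := by
  unfold pvP
  rw [List.take_add_one, List.getElem?_drop, List.getD_eq_getElem?_getD,
    List.getElem?_eq_getElem h]
  rfl

theorem pvHeadD_mem (cand : List Nat) (h : cand ≠ []) : cand.headD 0 ∈ cand := by
  cases cand with
  | nil => exact absurd rfl h
  | cons a t => simp [List.headD]

theorem pvInv_init (l : List Char) (hl : l ≠ []) : pvInv l (List.range l.length) 0 := by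
  have hn : l.length ≠ 0 := by simpa using hl
  refine ⟨Nat.zero_le _, by simpa using hn, ?_, ?_, ?_⟩
  · intro i hi; simpa using hi
  · intro i _ j _; simp [pvP]
  · intro j hj i _ _; simpa using hj

theorem pvInv_step (l : List Char) (cand : List Nat) (k : Nat)
    (hinv : pvInv l cand k) (hk : k < l.length) :
    pvInv l
      (cand.filter (fun i => (l ++ l).getD (i + k) ' ' ==
        (PySem.List.min? (cand.map (fun i => (l ++ l).getD (i + k) ' ')) (fun c => c)).getD ' '))
      (k + 1) := by
  obtain ⟨hkn, hne, hbnd, hmin, hcomp⟩ := hinv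
  set t := l ++ l with ht
  set c : Nat → Char := fun i => t.getD (i + k) ' ' with hc
  -- the minimum character over the candidates
  obtain ⟨m₀, hm₀⟩ : ∃ m₀, PySem.List.min? (cand.map c) (fun c => c) = some m₀ := by
    cases hx : PySem.List.min? (cand.map c) (fun c => c) with
    | none =>
      rw [PySem.List.min?_eq_none_iff] at hx
      exact absurd (List.map_eq_nil_iff.mp hx) hne
    | some m => exact ⟨m, rfl⟩
  have hm_mem : ∃ im ∈ cand, c im = m₀ := by
    have := PySem.List.min?_mem hm₀
    simpa using this
  have hm_min : ∀ i ∈ cand, m₀ ≤ c i := by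
    intro i hi
    exact PySem.List.min?_isMin hm₀ (c i) (List.mem_map_of_mem hi)
  have hfil : ∀ i, (i ∈ cand.filter (fun i => c i == m₀)) ↔ (i ∈ cand ∧ c i = m₀) := by
    intro i; simp [List.mem_filter]
  -- index-range facts
  have htlen : t.length = l.length + l.length := by simp [ht]
  have hidx : ∀ i, i < l.length → i + k < t.length := by intro i hi; omega
  have hPsucc : ∀ i, i < l.length → pvP t (k + 1) i = pvP t k i ++ [c i] := by
    intro i hi; exact pvP_succ t k i (hidx i hi)
  have hPlen : ∀ i, i < l.length → (pvP t k i).length = k := by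
    intro i hi; exact pvP_length t k i (le_of_lt (hidx i hi))
  -- common minimal prefix of candidates
  have hPeq : ∀ i ∈ cand, ∀ j ∈ cand, pvP t k i = pvP t k j := by
    intro i hi j hj
    exact le_antisymm (hmin i hi j (hbnd j hj)) (hmin j hj i (hbnd i hi))
  simp only [hm₀, Option.getD_some]
  refine ⟨by omega, ?_, ?_, ?_, ?_⟩
  · -- nonempty
    obtain ⟨im, him, hcim⟩ := hm_mem
    exact List.ne_nil_of_mem ((hfil im).mpr ⟨him, hcim⟩)
  · -- bounds
    intro i hi
    exact hbnd i ((hfil i).mp hi).1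
  · -- minimality of the extended prefix
    intro i hi j hj
    obtain ⟨hic, hcm⟩ := (hfil i).mp hi
    have hiN := hbnd i hic
    rw [hPsucc i hiN, hPsucc j hj, hcm]
    by_cases hjc : j ∈ cand
    · rw [hPeq j hjc i hic]
      exact (pvAppendSingletonLe _ _ _).mpr (hm_min j hjc)
    · have hlt : pvP t k i < pvP t k j := by
        rcases lt_or_ge (pvP t k i) (pvP t k j) with h | h
        · exact h
        · exact absurd (hcomp j hj i hic h) hjc
      exact le_of_lt (pvLtAppend _ _ _ _ (by rw [hPlen i hiN, hPlen j hj]) hlt)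
  · -- completeness
    intro j hj i hi hle
    obtain ⟨hic, hcm⟩ := (hfil i).mp hi
    have hiN := hbnd i hic
    rw [hPsucc i hiN, hPsucc j hj, hcm] at hle
    have hle_k : pvP t k j ≤ pvP t k i := by
      have := pvTakeMono k _ _ hle
      rwa [List.take_append_of_le_length (by rw [hPlen j hj]),
        List.take_append_of_le_length (by rw [hPlen i hiN]),
        List.take_of_length_le (by rw [hPlen j hj]),
        List.take_of_length_le (by rw [hPlen i hiN])] at this
    have hjc : j ∈ cand := hcomp j hj i hic hle_k
    have hPji : pvP t k j = pvP t k i := hPeq j hjc i hic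
    rw [hPji] at hle
    have hcj : c j ≤ m₀ := (pvAppendSingletonLe _ _ _).mp hle
    exact (hfil j).mpr ⟨hjc, le_antisymm hcj (hm_min j hjc)⟩

theorem pvPruneLoop_post (l : List Char) (fuel : Nat) : ∀ (k : Nat) (cand : List Nat),
    l.length - k ≤ fuel → pvInv l cand k →
    (pvPruneLoop (l ++ l) l.length cand k) ≠ [] ∧
    (∀ i ∈ (pvPruneLoop (l ++ l) l.length cand k), i < l.length) ∧
    (∀ j < l.length,
      pvP (l ++ l) l.length ((pvPruneLoop (l ++ l) l.length cand k).headD 0) ≤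
        pvP (l ++ l) l.length j) := by
  induction fuel with
  | zero =>
    intro k cand hfuel hinv
    obtain ⟨hkn, hne, hbnd, hmin, _⟩ := hinv
    have hkn' : k = l.length := by omega
    rw [pvPruneLoop, dif_neg (by omega)]
    subst hkn'
    exact ⟨hne, hbnd, fun j hj => hmin _ (pvHeadD_mem cand hne) j hj⟩
  | succ fuel ih =>
    intro k cand hfuel hinv
    by_cases hg : 1 < cand.length ∧ k < l.length
    · rw [pvPruneLoop, dif_pos hg]
      exact ih (k + 1) _ (by omega) (pvInv_step l cand k hinv hg.2)
    · rw [pvPruneLoop, dif_neg hg]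
      obtain ⟨hkn, hne, hbnd, hmin, hcomp⟩ := hinv
      refine ⟨hne, hbnd, ?_⟩
      intro j hj
      have hhd : cand.headD 0 ∈ cand := pvHeadD_mem cand hne
      rcases Nat.lt_or_ge k l.length with hk | hk
      · -- the loop stopped because a single candidate is left
        have hlen1 : cand.length = 1 := by
          have h0 : 0 < cand.length := List.length_pos_of_ne_nil hne
          omega
        obtain ⟨i₀, rfl⟩ := List.length_eq_one_iff.mp hlen1
        simp only [List.headD]
        by_cases hji : j = i₀
        · subst hji; exact le_refl _
        · -- j's k-prefix is strictly larger, and prefixes decide the rotation order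
          have hstrict : pvP (l ++ l) k i₀ < pvP (l ++ l) k j := by
            rcases lt_or_ge (pvP (l ++ l) k i₀) (pvP (l ++ l) k j) with h | h
            · exact h
            · have := hcomp j hj i₀ (List.mem_singleton.mpr rfl) h
              simp at this
              exact absurd this hji
          have hi₀N : i₀ < l.length := hbnd i₀ (List.mem_singleton.mpr rfl)
          have hsplit : ∀ i, i < l.length →
              pvP (l ++ l) l.length i = pvP (l ++ l) k i ++ ((l ++ l).drop i |>.drop k |>.take (l.length - k)) := by
            intro i hi
            unfold pvP
            rw [show l.length = k + (l.length - k) by omega, List.take_add,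
              Nat.add_sub_cancel_left]
          rw [hsplit i₀ hi₀N, hsplit j hj]
          refine le_of_lt (pvLtAppend _ _ _ _ ?_ hstrict)
          rw [pvP_length _ _ _ (by simp; omega), pvP_length _ _ _ (by simp; omega)]
      · -- the loop stopped because the prefixes reached full length
        have hkn' : k = l.length := by omega
        subst hkn'
        exact hmin _ hhd j hj

theorem pvRot_eq (l : List Char) (i : Nat) (h : i ≤ l.length) :
    pvP (l ++ l) l.length i = l.drop i ++ l.take i := by
  unfold pvP
  rw [List.drop_append_of_le_length h, List.take_append]
  have h1 : (l.drop i).length = l.length - i := by simp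
  rw [List.take_of_length_le (by omega), h1]
  congr 2
  omega

theorem pvRotList_eq (l : List Char) :
    ((PySem.List.pyRange 0 (l.length : Int) 1).map
      (fun i => PySem.List.slice l (some i) none ++ PySem.List.slice l none (some i))) =
    (List.range l.length).map (fun i => l.drop i ++ l.take i) := by
  rw [PySem.List.pyRange_zero_natCast, List.map_map]
  refine List.map_congr_left (fun k hk => ?_)
  simp [PySem.List.slice_from_natCast, PySem.List.slice_to_natCast]

-- min? specialised to the instances the A-port elaborates with (first minimal element)
theorem pvMin?_isMinAux {α : Type} (key : α → List Char) (m : α) :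
    ∀ (xs : List α) (acc : Option α),
      (xs.foldl (fun acc x =>
        match acc with
        | none => some x
        | some m => if key x < key m then some x else some m) acc) = some m →
      (∀ y, acc = some y → key m ≤ key y) ∧ (∀ y ∈ xs, key m ≤ key y) := by
  intro xs
  induction xs with
  | nil =>
    intro acc h
    refine ⟨?_, by simp⟩
    intro y hy
    rw [hy] at h
    cases h
    exact le_refl _
  | cons x xs ih =>
    intro acc h
    rw [List.foldl_cons] at h
    obtain ⟨hacc, hmem⟩ := ih _ h
    cases acc with
    | none =>
      have hx : key m ≤ key x := hacc x rfl
      refine ⟨by simp, ?_⟩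
      intro y hy
      rcases List.mem_cons.mp hy with rfl | hy
      · exact hx
      · exact hmem y hy
    | some a =>
      by_cases hlt : key x < key a
      · simp only [if_pos hlt] at hacc
        have hx : key m ≤ key x := hacc x rfl
        refine ⟨?_, ?_⟩
        · intro y hy; cases hy; exact le_trans hx (le_of_lt hlt)
        · intro y hy
          rcases List.mem_cons.mp hy with rfl | hy
          · exact hx
          · exact hmem y hy
      · simp only [if_neg hlt] at hacc
        have ha : key m ≤ key a := hacc a rfl
        refine ⟨?_, ?_⟩
        · intro y hy; cases hy; exact ha
        · intro y hy
          rcases List.mem_cons.mp hy with rfl | hy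
          · exact le_trans ha (not_lt.mp hlt)
          · exact hmem y hy

theorem pvMin?_isMin {α : Type} (xs : List α) (key : α → List Char) (m : α)
    (h : PySem.List.min? xs key = some m) : ∀ y ∈ xs, key m ≤ key y := by
  have h' : (xs.foldl (fun acc x =>
      match acc with
      | none => some x
      | some m => if key x < key m then some x else some m) none) = some m := by
    simpa [PySem.List.min?] using h
  exact (pvMin?_isMinAux key m xs none h').2

theorem pvLeastRotation_eq (l : List Char) (hl : l ≠ []) :
    pvMinRotationA l.length l = some (pvLeastRotation l) := by
  have hpost := pvPruneLoop_post l l.length 0 (List.range l.length) (by omega) (pvInv_init l hl)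
  obtain ⟨hne, hbnd, hmin⟩ := hpost
  set i₀ := (pvPruneLoop (l ++ l) l.length (List.range l.length) 0).headD 0 with hi₀def
  have hi₀ : i₀ < l.length := hbnd i₀ (pvHeadD_mem _ hne)
  have hB : pvLeastRotation l = pvP (l ++ l) l.length i₀ := rfl
  -- A's min over the rotation list
  obtain ⟨a, ha⟩ : ∃ a, pvMinRotationA l.length l = some a := by
    cases hx : pvMinRotationA l.length l with
    | none =>
      unfold pvMinRotationA at hx
      rw [PySem.List.min?_eq_none_iff, pvRotList_eq, List.map_eq_nil_iff,
        List.range_eq_nil] at hx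
      exact absurd (List.length_eq_zero_iff.mp hx) hl
    | some a => exact ⟨a, rfl⟩
  have ha' := ha
  unfold pvMinRotationA at ha'
  have hamem := PySem.List.min?_mem ha'
  have hamin := pvMin?_isMin _ _ _ ha'
  rw [pvRotList_eq] at hamem hamin
  obtain ⟨j₀, hj₀, hja⟩ := List.mem_map.mp hamem
  rw [List.mem_range] at hj₀
  have h1 : a ≤ pvP (l ++ l) l.length i₀ := by
    rw [pvRot_eq l i₀ (le_of_lt hi₀)]
    exact hamin _ (List.mem_map_of_mem (List.mem_range.mpr hi₀))
  have h2 : pvP (l ++ l) l.length i₀ ≤ a := by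
    rw [← hja, ← pvRot_eq l j₀ (le_of_lt hj₀)]
    exact hmin j₀ hj₀
  rw [ha, hB, le_antisymm h1 h2]

-- ===== VERDICT (by name: the statement is the Claim_ definition above) =====
theorem canonical_bracelet_spec : Claim_equal_canonical_bracelet := by
  intro chars _ hpre
  unfold Spec_canonical_bracelet
  have hs : chars.toList ≠ [] := by
    intro h
    exact hpre (by simpa using congrArg String.ofList h)
  have hr : chars.toList.reverse ≠ [] := by simpa using hs
  have h1 := pvLeastRotation_eq chars.toList hs
  have h2 := pvLeastRotation_eq chars.toList.reverse hr
  rw [List.length_reverse] at h2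
  have hlen : chars.toList.length ≠ 0 := by simpa using hs
  unfold canonical_bracelet canonical_bracelet_alt
  simp only [h1, h2, if_neg hlen, min_def]
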